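-- pv_equiv track=rewrite | github.com/tbalint57/bt415_ads_2024 | fynesse/utils/osm_utils.py | stops_data_extractor
-- ===== SOURCE A (Python) =====
-- def stops_data_extractor(nodes):
--     stops = {
--         "bus": 0,
--         "train": 0,
--         "underground": 0,
--         "tram": 0
--     }
--
--     bus_stop_count_by_type = {
--         "shelter": 0,
--         "covered": 0,
--         "lit": 0,
--         "bench": 0,
--         "wheelchair": 0,
--         "passenger_information_display": 0
--     }
--
--     for node in nodes:
--         node_tags = node[2]
--
--         if node_tags.get("highway") == "bus_stop":
--             stops["bus"] += 1
--             for type in bus_stop_count_by_type: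
--                 if node_tags.get(type) == "yes":
--                     bus_stop_count_by_type[type] += 1
--
--         if node_tags.get("railway") == "station":
--             if node_tags.get("station") == "subway":
--                 stops["underground"] += 1
--
--             elif node_tags.get("station") == "subway":
--                 stops["underground"] += 1
--
--             else:
--                 stops["train"] += 1
--
--
--     return stops, bus_stop_count_by_type
-- ===== SOURCE B (Python) =====
-- def stops_data_extractor(nodes):
--     def is_bus(node):
--         return node[2].get("highway") == "bus_stop"
--
--     def is_station(node):
--         return node[2].get("railway") == "station"
--
--     stops = {
--         "bus": sum(1 for node in nodes if is_bus(node)),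
--         "train": sum(1 for node in nodes
--                      if is_station(node) and node[2].get("station") != "subway"),
--         "underground": sum(1 for node in nodes
--                            if is_station(node) and node[2].get("station") == "subway"),
--         "tram": 0,
--     }
--
--     bus_stop_count_by_type = {
--         t: sum(1 for node in nodes if is_bus(node) and node[2].get(t) == "yes")
--         for t in ("shelter", "covered", "lit", "bench",
--                   "wheelchair", "passenger_information_display")
--     }
--
--     return stops, bus_stop_count_by_type
-- ===== Notes on version B (the rewrite author's own statement) =====
-- stated objective: simpler
-- what changed: Replaces the single accumulating pass that mutates two counter dicts (with a nested loop over the amenity-type dict and a duplicated elif branch) by independent per-counter scans: each dict entry is a direct count of the nodes matching its predicate.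
import Mathlib
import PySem

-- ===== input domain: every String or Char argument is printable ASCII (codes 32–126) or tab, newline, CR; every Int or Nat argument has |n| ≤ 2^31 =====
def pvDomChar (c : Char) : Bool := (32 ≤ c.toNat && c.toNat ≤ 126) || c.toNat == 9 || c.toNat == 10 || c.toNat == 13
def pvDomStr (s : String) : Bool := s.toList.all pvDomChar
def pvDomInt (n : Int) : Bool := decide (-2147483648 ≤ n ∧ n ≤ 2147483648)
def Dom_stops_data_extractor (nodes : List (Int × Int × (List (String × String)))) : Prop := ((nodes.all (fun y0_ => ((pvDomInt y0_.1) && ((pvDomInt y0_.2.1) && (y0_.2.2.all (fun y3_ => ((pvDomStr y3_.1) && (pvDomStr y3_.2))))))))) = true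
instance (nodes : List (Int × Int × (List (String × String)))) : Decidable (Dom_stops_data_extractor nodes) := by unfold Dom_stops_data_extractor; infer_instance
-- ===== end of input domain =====

-- B replaces A's single accumulating pass that mutates two counter dicts (with a nested
-- loop over the amenity-type dict) by independent per-counter scans, one direct count per entry.

-- ===== PORT A =====
-- node_tags.get(k): the Python dict of tags is an association list here, lookup = first match
def pvTagGetA (tags : List (String × String)) (k : String) : Option String :=
  (PySem.Dict.mk tags).get? k

-- the body of A's 'for node in nodes' loop: state = (stops, bus_stop_count_by_type)
def pvStepA (st : PySem.Dict String Int × PySem.Dict String Int)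
    (node : Int × Int × (List (String × String))) :
    PySem.Dict String Int × PySem.Dict String Int :=
  let tags := node.2.2
  let stops := st.1
  let bt := st.2
  let stops := if pvTagGetA tags "highway" = some "bus_stop"
    then stops.modify "bus" 0 (· + 1) else stops
  let bt := if pvTagGetA tags "highway" = some "bus_stop"
    then (PySem.Dict.keys bt).foldl
      (fun bt ty => if pvTagGetA tags ty = some "yes" then bt.modify ty 0 (· + 1) else bt) bt
    else bt
  let stops := if pvTagGetA tags "railway" = some "station" then
      if pvTagGetA tags "station" = some "subway" then stops.modify "underground" 0 (· + 1)
      else if pvTagGetA tags "station" = some "subway" then stops.modify "underground" 0 (· + 1)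
      else stops.modify "train" 0 (· + 1)
    else stops
  (stops, bt)

def stops_data_extractor (nodes : List (Int × Int × (List (String × String)))) : (List (String × Int)) × (List (String × Int)) :=
  let stops0 : PySem.Dict String Int :=
    PySem.Dict.mk [("bus", 0), ("train", 0), ("underground", 0), ("tram", 0)]
  let bt0 : PySem.Dict String Int :=
    PySem.Dict.mk [("shelter", 0), ("covered", 0), ("lit", 0), ("bench", 0),
                   ("wheelchair", 0), ("passenger_information_display", 0)]
  let res := nodes.foldl pvStepA (stops0, bt0)
  (res.1.items, res.2.items)

-- ===== PORT B =====
def pvIsBus (node : Int × Int × (List (String × String))) : Bool :=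
  (PySem.Dict.mk node.2.2).get? "highway" == some "bus_stop"

def pvIsStation (node : Int × Int × (List (String × String))) : Bool :=
  (PySem.Dict.mk node.2.2).get? "railway" == some "station"

def stops_data_extractor_alt (nodes : List (Int × Int × (List (String × String)))) : (List (String × Int)) × (List (String × Int)) :=
  let stops : List (String × Int) :=
    [("bus", (nodes.countP pvIsBus : Int)),
     ("train", (nodes.countP (fun n => pvIsStation n && !((PySem.Dict.mk n.2.2).get? "station" == some "subway")) : Int)),
     ("underground", (nodes.countP (fun n => pvIsStation n && ((PySem.Dict.mk n.2.2).get? "station" == some "subway")) : Int)),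
     ("tram", 0)]
  let bt : List (String × Int) :=
    ["shelter", "covered", "lit", "bench", "wheelchair", "passenger_information_display"].map
      (fun t => (t, (nodes.countP (fun n => pvIsBus n && ((PySem.Dict.mk n.2.2).get? t == some "yes")) : Int)))
  (stops, bt)

-- ===== PRECONDITION & SPEC =====
def Spec_stops_data_extractor (nodes : List (Int × Int × (List (String × String)))) (out : (List (String × Int)) × (List (String × Int))) : Prop := out = stops_data_extractor_alt nodes
instance (nodes : List (Int × Int × (List (String × String)))) (out : (List (String × Int)) × (List (String × Int))) : Decidable (Spec_stops_data_extractor nodes out) := by unfold Spec_stops_data_extractor; infer_instance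

-- ===== CLAIM (what is proved, stated in full; the proofs are below) =====
def Claim_equal_stops_data_extractor : Prop := ∀ (nodes : List (Int × Int × (List (String × String)))), Dom_stops_data_extractor nodes → Spec_stops_data_extractor nodes (stops_data_extractor nodes)

-- ===== LEMMAS AND PROOFS =====

lemma pvBt1 (tags : List (String × String)) (v1 v2 v3 v4 v5 v6 : Int) :
    (if pvTagGetA tags "shelter" = some "yes"
      then (PySem.Dict.mk [("shelter", v1), ("covered", v2), ("lit", v3), ("bench", v4), ("wheelchair", v5), ("passenger_information_display", v6)]).modify "shelter" 0 (· + 1)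
      else PySem.Dict.mk [("shelter", v1), ("covered", v2), ("lit", v3), ("bench", v4), ("wheelchair", v5), ("passenger_information_display", v6)]) =
    PySem.Dict.mk [("shelter", v1 + (if pvTagGetA tags "shelter" = some "yes" then 1 else 0)), ("covered", v2), ("lit", v3), ("bench", v4), ("wheelchair", v5), ("passenger_information_display", v6)] := by
  split_ifs <;> simp [PySem.Dict.modify, PySem.Dict.insert, PySem.Dict.getD, PySem.Dict.get?, PySem.Dict.contains]

lemma pvBt2 (tags : List (String × String)) (v1 v2 v3 v4 v5 v6 : Int) :
    (if pvTagGetA tags "covered" = some "yes"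
      then (PySem.Dict.mk [("shelter", v1), ("covered", v2), ("lit", v3), ("bench", v4), ("wheelchair", v5), ("passenger_information_display", v6)]).modify "covered" 0 (· + 1)
      else PySem.Dict.mk [("shelter", v1), ("covered", v2), ("lit", v3), ("bench", v4), ("wheelchair", v5), ("passenger_information_display", v6)]) =
    PySem.Dict.mk [("shelter", v1), ("covered", v2 + (if pvTagGetA tags "covered" = some "yes" then 1 else 0)), ("lit", v3), ("bench", v4), ("wheelchair", v5), ("passenger_information_display", v6)] := by
  split_ifs <;> simp [PySem.Dict.modify, PySem.Dict.insert, PySem.Dict.getD, PySem.Dict.get?, PySem.Dict.contains]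

lemma pvBt3 (tags : List (String × String)) (v1 v2 v3 v4 v5 v6 : Int) :
    (if pvTagGetA tags "lit" = some "yes"
      then (PySem.Dict.mk [("shelter", v1), ("covered", v2), ("lit", v3), ("bench", v4), ("wheelchair", v5), ("passenger_information_display", v6)]).modify "lit" 0 (· + 1)
      else PySem.Dict.mk [("shelter", v1), ("covered", v2), ("lit", v3), ("bench", v4), ("wheelchair", v5), ("passenger_information_display", v6)]) =
    PySem.Dict.mk [("shelter", v1), ("covered", v2), ("lit", v3 + (if pvTagGetA tags "lit" = some "yes" then 1 else 0)), ("bench", v4), ("wheelchair", v5), ("passenger_information_display", v6)] := by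
  split_ifs <;> simp [PySem.Dict.modify, PySem.Dict.insert, PySem.Dict.getD, PySem.Dict.get?, PySem.Dict.contains]

lemma pvBt4 (tags : List (String × String)) (v1 v2 v3 v4 v5 v6 : Int) :
    (if pvTagGetA tags "bench" = some "yes"
      then (PySem.Dict.mk [("shelter", v1), ("covered", v2), ("lit", v3), ("bench", v4), ("wheelchair", v5), ("passenger_information_display", v6)]).modify "bench" 0 (· + 1)
      else PySem.Dict.mk [("shelter", v1), ("covered", v2), ("lit", v3), ("bench", v4), ("wheelchair", v5), ("passenger_information_display", v6)]) =
    PySem.Dict.mk [("shelter", v1), ("covered", v2), ("lit", v3), ("bench", v4 + (if pvTagGetA tags "bench" = some "yes" then 1 else 0)), ("wheelchair", v5), ("passenger_information_display", v6)] := by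
  split_ifs <;> simp [PySem.Dict.modify, PySem.Dict.insert, PySem.Dict.getD, PySem.Dict.get?, PySem.Dict.contains]

lemma pvBt5 (tags : List (String × String)) (v1 v2 v3 v4 v5 v6 : Int) :
    (if pvTagGetA tags "wheelchair" = some "yes"
      then (PySem.Dict.mk [("shelter", v1), ("covered", v2), ("lit", v3), ("bench", v4), ("wheelchair", v5), ("passenger_information_display", v6)]).modify "wheelchair" 0 (· + 1)
      else PySem.Dict.mk [("shelter", v1), ("covered", v2), ("lit", v3), ("bench", v4), ("wheelchair", v5), ("passenger_information_display", v6)]) =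
    PySem.Dict.mk [("shelter", v1), ("covered", v2), ("lit", v3), ("bench", v4), ("wheelchair", v5 + (if pvTagGetA tags "wheelchair" = some "yes" then 1 else 0)), ("passenger_information_display", v6)] := by
  split_ifs <;> simp [PySem.Dict.modify, PySem.Dict.insert, PySem.Dict.getD, PySem.Dict.get?, PySem.Dict.contains]

lemma pvBt6 (tags : List (String × String)) (v1 v2 v3 v4 v5 v6 : Int) :
    (if pvTagGetA tags "passenger_information_display" = some "yes"
      then (PySem.Dict.mk [("shelter", v1), ("covered", v2), ("lit", v3), ("bench", v4), ("wheelchair", v5), ("passenger_information_display", v6)]).modify "passenger_information_display" 0 (· + 1)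
      else PySem.Dict.mk [("shelter", v1), ("covered", v2), ("lit", v3), ("bench", v4), ("wheelchair", v5), ("passenger_information_display", v6)]) =
    PySem.Dict.mk [("shelter", v1), ("covered", v2), ("lit", v3), ("bench", v4), ("wheelchair", v5), ("passenger_information_display", v6 + (if pvTagGetA tags "passenger_information_display" = some "yes" then 1 else 0))] := by
  split_ifs <;> simp [PySem.Dict.modify, PySem.Dict.insert, PySem.Dict.getD, PySem.Dict.get?, PySem.Dict.contains]

lemma pvBeqTag (tags : List (String × String)) (k v : String) :
    ((PySem.Dict.mk tags).get? k == some v) = decide (pvTagGetA tags k = some v) := by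
  unfold pvTagGetA
  by_cases h : (PySem.Dict.mk tags).get? k = some v <;> simp [h]

lemma pvStepA_eq (n : Int × Int × (List (String × String)))
    (b t u tr sh co li be wh pi : Int) :
    pvStepA (PySem.Dict.mk [("bus", b), ("train", t), ("underground", u), ("tram", tr)],
             PySem.Dict.mk [("shelter", sh), ("covered", co), ("lit", li), ("bench", be), ("wheelchair", wh), ("passenger_information_display", pi)]) n =
      (PySem.Dict.mk [("bus", b + (if pvIsBus n then (1:Int) else 0)), ("train", t + (if (fun n => pvIsStation n && !((PySem.Dict.mk n.2.2).get? "station" == some "subway")) n then (1:Int) else 0)), ("underground", u + (if (fun n => pvIsStation n && ((PySem.Dict.mk n.2.2).get? "station" == some "subway")) n then (1:Int) else 0)), ("tram", tr)],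
       PySem.Dict.mk [("shelter", sh + (if (fun n => pvIsBus n && ((PySem.Dict.mk n.2.2).get? "shelter" == some "yes")) n then (1:Int) else 0)), ("covered", co + (if (fun n => pvIsBus n && ((PySem.Dict.mk n.2.2).get? "covered" == some "yes")) n then (1:Int) else 0)), ("lit", li + (if (fun n => pvIsBus n && ((PySem.Dict.mk n.2.2).get? "lit" == some "yes")) n then (1:Int) else 0)), ("bench", be + (if (fun n => pvIsBus n && ((PySem.Dict.mk n.2.2).get? "bench" == some "yes")) n then (1:Int) else 0)), ("wheelchair", wh + (if (fun n => pvIsBus n && ((PySem.Dict.mk n.2.2).get? "wheelchair" == some "yes")) n then (1:Int) else 0)), ("passenger_information_display", pi + (if (fun n => pvIsBus n && ((PySem.Dict.mk n.2.2).get? "passenger_information_display" == some "yes")) n then (1:Int) else 0))]) := by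
  by_cases hb : pvTagGetA n.2.2 "highway" = some "bus_stop" <;>
  by_cases hr : pvTagGetA n.2.2 "railway" = some "station" <;>
  by_cases hs : pvTagGetA n.2.2 "station" = some "subway" <;>
  · simp only [pvStepA, hb, hr, hs, if_true, if_false,
      PySem.Dict.keys_mk, List.map, List.foldl]
    try rw [pvBt1, pvBt2, pvBt3, pvBt4, pvBt5, pvBt6]
    simp only [pvIsBus, pvIsStation, pvBeqTag]
    simp [hb, hr, hs,
      PySem.Dict.modify, PySem.Dict.insert, PySem.Dict.getD, PySem.Dict.get?, PySem.Dict.contains]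

lemma pvFold_inv (nodes : List (Int × Int × (List (String × String))))
    (b t u tr sh co li be wh pi : Int) :
    nodes.foldl pvStepA
      (PySem.Dict.mk [("bus", b), ("train", t), ("underground", u), ("tram", tr)],
       PySem.Dict.mk [("shelter", sh), ("covered", co), ("lit", li), ("bench", be), ("wheelchair", wh), ("passenger_information_display", pi)]) =
      (PySem.Dict.mk [("bus", b + (nodes.countP pvIsBus : Int)), ("train", t + (nodes.countP (fun n => pvIsStation n && !((PySem.Dict.mk n.2.2).get? "station" == some "subway")) : Int)), ("underground", u + (nodes.countP (fun n => pvIsStation n && ((PySem.Dict.mk n.2.2).get? "station" == some "subway")) : Int)), ("tram", tr)],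
       PySem.Dict.mk [("shelter", sh + (nodes.countP (fun n => pvIsBus n && ((PySem.Dict.mk n.2.2).get? "shelter" == some "yes")) : Int)), ("covered", co + (nodes.countP (fun n => pvIsBus n && ((PySem.Dict.mk n.2.2).get? "covered" == some "yes")) : Int)), ("lit", li + (nodes.countP (fun n => pvIsBus n && ((PySem.Dict.mk n.2.2).get? "lit" == some "yes")) : Int)), ("bench", be + (nodes.countP (fun n => pvIsBus n && ((PySem.Dict.mk n.2.2).get? "bench" == some "yes")) : Int)), ("wheelchair", wh + (nodes.countP (fun n => pvIsBus n && ((PySem.Dict.mk n.2.2).get? "wheelchair" == some "yes")) : Int)), ("passenger_information_display", pi + (nodes.countP (fun n => pvIsBus n && ((PySem.Dict.mk n.2.2).get? "passenger_information_display" == some "yes")) : Int))]) := by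
  induction nodes generalizing b t u tr sh co li be wh pi with
  | nil => simp
  | cons n rest ih =>
    rw [List.foldl_cons, pvStepA_eq, ih]
    simp only [List.countP_cons, Nat.cast_add, Nat.cast_ite, Nat.cast_one, Nat.cast_zero]
    ring_nf

-- ===== VERDICT (by name: the statement is the Claim_ definition above) =====
theorem stops_data_extractor_spec : Claim_equal_stops_data_extractor := by
  intro nodes _
  unfold Spec_stops_data_extractor stops_data_extractor stops_data_extractor_alt
  simp only [pvFold_inv]
  simp
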